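-- pv_equiv track=rewrite | github.com/food-run/food-run-ce | tools/scripts/verify.py | has_structured_tldr
-- ===== SOURCE A (Python) =====
-- TLDR_REQUIRED_MARKERS = (
--     'TL;DR  -->',
--     '- Later Extension Points:',
--     '- Role:',
--     '- Exports:',
--     '- Consumed By:',
-- )
--
-- def has_structured_tldr(text: str) -> bool:
--     # Track the prior marker position across the scan.
--     previous_index = -1
--     # Require the canonical marker order without reordering.
--     for marker in TLDR_REQUIRED_MARKERS:
--         # Find the next marker after the prior one.
--         current_index = text.find(marker, previous_index + 1)
--         # Fail when any required marker is missing.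
--         if current_index == -1:
--             return False
--         # Advance the scan window to this marker.
--         previous_index = current_index
--     # Confirm the full ordered marker chain passed.
--     return True
-- ===== SOURCE B (Python) =====
-- TLDR_REQUIRED_MARKERS = (
--     'TL;DR  -->',
--     '- Later Extension Points:',
--     '- Role:',
--     '- Exports:',
--     '- Consumed By:',
-- )
--
-- def has_structured_tldr(text: str) -> bool:
--     # Single left-to-right scan: at each position, if the next required
--     # marker starts here, advance to the following marker.
--     remaining = list(TLDR_REQUIRED_MARKERS)
--     for i in range(len(text)):
--         if not remaining:
--             break
--         if text.startswith(remaining[0], i):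
--             del remaining[0]
--     return not remaining
-- ===== Notes on version B (the rewrite author's own statement) =====
-- stated objective: alternative
-- what changed: Replaced the five chained text.find scans threading previous_index with a single left-to-right scan over positions that keeps a pointer into the marker list and advances it whenever the next required marker starts at the current position.
import Mathlib
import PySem

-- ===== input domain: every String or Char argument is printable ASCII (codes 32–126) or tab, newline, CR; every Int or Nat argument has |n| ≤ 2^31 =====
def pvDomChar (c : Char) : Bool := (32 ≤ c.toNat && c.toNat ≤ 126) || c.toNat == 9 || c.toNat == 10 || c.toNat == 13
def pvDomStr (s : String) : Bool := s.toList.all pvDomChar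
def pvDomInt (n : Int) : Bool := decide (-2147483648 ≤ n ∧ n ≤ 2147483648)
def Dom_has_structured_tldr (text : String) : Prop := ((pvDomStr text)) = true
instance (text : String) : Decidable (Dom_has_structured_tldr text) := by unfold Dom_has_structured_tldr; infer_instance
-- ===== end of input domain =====

-- B replaces A's five chained find scans with one left-to-right position scan holding a
-- pointer into the marker list (alternative structure, same exact behaviour).

-- ===== PORT A =====
-- the module constant TLDR_REQUIRED_MARKERS, as lists of chars
def pvMarkers : List (List Char) :=
  ["TL;DR  -->".toList, "- Later Extension Points:".toList, "- Role:".toList,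
   "- Exports:".toList, "- Consumed By:".toList]

-- A's for-loop over the markers, threading previous_index; text.find(m, i) = Chars.findFrom
def pvALoop (s : List Char) : List (List Char) → Int → Bool
  | [], _ => true
  | m :: ms, prev =>
    let cur := PySem.Chars.findFrom s m (prev + 1) none
    if cur = -1 then false else pvALoop s ms cur

def has_structured_tldr (text : String) : Bool := pvALoop text.toList pvMarkers (-1)

-- ===== PORT B =====
-- B's for-loop over positions i (here: structural recursion on the suffix text[i:]);
-- text.startswith(m, i) with 0 ≤ i ≤ len(text) is exactly Chars.startswith of the suffix
def pvBLoop : List Char → List (List Char) → Bool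
  | _, [] => true
  | [], _ :: _ => false
  | c :: t, m :: ms =>
    if PySem.Chars.startswith (c :: t) m then pvBLoop t ms else pvBLoop t (m :: ms)

def has_structured_tldr_alt (text : String) : Bool := pvBLoop text.toList pvMarkers

-- ===== PRECONDITION & SPEC =====
def Spec_has_structured_tldr (text : String) (out : Bool) : Prop := out = has_structured_tldr_alt text
instance (text : String) (out : Bool) : Decidable (Spec_has_structured_tldr text out) := by unfold Spec_has_structured_tldr; infer_instance

-- ===== CLAIM (what is proved, stated in full; the proofs are below) =====
def Claim_equal_has_structured_tldr : Prop := ∀ (text : String), Dom_has_structured_tldr text → Spec_has_structured_tldr text (has_structured_tldr text)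

-- ===== LEMMAS AND PROOFS =====

-- if the marker starts exactly at position k, find(m, k) returns k
lemma pv_findFrom_at (s m : List Char) (k : Nat) (hk : k ≤ s.length)
    (h : m <+: s.drop k) : PySem.Chars.findFrom s m (k : Int) none = (k : Int) := by
  have hne : PySem.Chars.findFrom s m (k : Int) none ≠ -1 := fun hc =>
    (PySem.Chars.findFrom_natCast_eq_neg_one_iff s m k hk).mp hc h.isInfix
  obtain ⟨hle, hpre, hmin⟩ := PySem.Chars.findFrom_natCast_spec s m k hk hne
  by_cases hlt : k < (PySem.Chars.findFrom s m (k : Int) none).toNat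
  · exact absurd h (hmin k le_rfl hlt)
  · omega

-- if the (nonempty) marker does not start at position k < len, find(m, k) = find(m, k+1)
lemma pv_findFrom_step (s m : List Char) (k : Nat) (hk : k < s.length)
    (h : ¬ m <+: s.drop k) :
    PySem.Chars.findFrom s m (k : Int) none = PySem.Chars.findFrom s m ((k : Int) + 1) none := by
  have hk' : k ≤ s.length := le_of_lt hk
  have hk1 : k + 1 ≤ s.length := hk
  have hcast : ((k : Int) + 1) = ((k + 1 : Nat) : Int) := by push_cast; ring
  rw [hcast]
  have hdd : (s.drop k).drop 1 = s.drop (k + 1) := by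
    rw [List.drop_drop]
  by_cases h1 : PySem.Chars.findFrom s m (k : Int) none = -1
  · rw [h1]
    symm
    rw [PySem.Chars.findFrom_natCast_eq_neg_one_iff s m (k + 1) hk1]
    intro hinf
    have : m <:+: s.drop k := hinf.trans (hdd ▸ List.drop_suffix 1 (s.drop k)).isInfix
    exact (PySem.Chars.findFrom_natCast_eq_neg_one_iff s m k hk').mp h1 this
  · obtain ⟨hle, hpre, hmin⟩ := PySem.Chars.findFrom_natCast_spec s m k hk' h1
    have hfk : k + 1 ≤ (PySem.Chars.findFrom s m (k : Int) none).toNat := by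
      have : (PySem.Chars.findFrom s m (k : Int) none).toNat ≠ k := by
        intro he; exact h (he ▸ hpre)
      omega
    have h2 : PySem.Chars.findFrom s m ((k + 1 : Nat) : Int) none ≠ -1 := by
      intro hc
      apply (PySem.Chars.findFrom_natCast_eq_neg_one_iff s m (k + 1) hk1).mp hc
      rw [← PySem.Chars.isIn_iff_infix, ← PySem.Chars.exists_prefix_drop_iff_isIn]
      refine ⟨(PySem.Chars.findFrom s m (k : Int) none).toNat - (k + 1), ?_⟩
      rw [List.drop_drop,
        show k + 1 + ((PySem.Chars.findFrom s m (k : Int) none).toNat - (k + 1))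
          = (PySem.Chars.findFrom s m (k : Int) none).toNat from by omega]
      exact hpre
    obtain ⟨hle2, hpre2, hmin2⟩ := PySem.Chars.findFrom_natCast_spec s m (k + 1) hk1 h2
    by_cases hlt : (PySem.Chars.findFrom s m ((k + 1 : Nat) : Int) none).toNat
        < (PySem.Chars.findFrom s m (k : Int) none).toNat
    · exact absurd hpre2 (hmin _ (by omega) hlt)
    · by_cases hlt2 : (PySem.Chars.findFrom s m (k : Int) none).toNat
          < (PySem.Chars.findFrom s m ((k + 1 : Nat) : Int) none).toNat
      · exact absurd hpre (hmin2 _ (by omega) hlt2)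
      · omega

-- main invariant: A's chained-find loop started after position k-1 equals B's scan of the suffix from k
lemma pv_key : ∀ (n : Nat) (s : List Char) (ms : List (List Char)) (k : Nat),
    s.length - k = n → k ≤ s.length → (∀ m ∈ ms, m ≠ []) →
    pvALoop s ms ((k : Int) - 1) = pvBLoop (s.drop k) ms := by
  intro n
  induction n with
  | zero =>
    intro s ms k hn hk hms
    have hkl : k = s.length := by omega
    have hd : s.drop k = [] := by subst hkl; simp
    cases ms with
    | nil => simp [pvALoop, pvBLoop]
    | cons m ms =>
      have hstart : ((k : Int) - 1) + 1 = (k : Int) := by ring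
      have hfind : PySem.Chars.findFrom s m (k : Int) none = -1 := by
        rw [PySem.Chars.findFrom_natCast_eq_neg_one_iff s m k (le_of_eq hkl)]
        rw [hd]
        intro hc
        exact hms m (by simp) (List.infix_nil.mp hc)
      simp [pvALoop, pvBLoop, hstart, hfind, hd]
  | succ n ih =>
    intro s ms k hn hk hms
    have hklt : k < s.length := by omega
    cases ms with
    | nil => simp [pvALoop, pvBLoop]
    | cons m ms =>
      obtain ⟨c, t, hd⟩ : ∃ c t, s.drop k = c :: t := by
        cases hdk : s.drop k with
        | nil => exact absurd (List.drop_eq_nil_iff.mp hdk) (by omega)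
        | cons c t => exact ⟨c, t, rfl⟩
      have ht : s.drop (k + 1) = t := by
        rw [← List.tail_drop, hd, List.tail_cons]
      have hstart : ((k : Int) - 1) + 1 = (k : Int) := by ring
      have hstart1 : (((k + 1 : Nat) : Int) - 1) + 1 = ((k : Int) + 1) := by push_cast; ring
      by_cases hp : m <+: s.drop k
      · -- marker starts at k: both sides pop it and continue from k+1
        have hsw : PySem.Chars.startswith (c :: t) m = true := by
          rw [PySem.Chars.startswith_iff]; rw [hd] at hp; exact hp
        have hfind := pv_findFrom_at s m k (le_of_lt hklt) hp
        have hne : PySem.Chars.findFrom s m (k : Int) none ≠ -1 := by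
          rw [hfind]; omega
        have hih := ih s ms (k + 1) (by omega) (by omega)
          (fun x hx => hms x (by simp [hx]))
        rw [hd]
        simp only [pvALoop, pvBLoop, hstart, hsw, if_true]
        rw [hfind, if_neg (show (k : Int) ≠ -1 by omega)]
        rw [show ((k : Int)) = (((k + 1 : Nat) : Int) - 1) by push_cast; ring]
        rw [hih, ht]
      · -- no marker at k: A's find skips position k, B steps to k+1 with the same markers
        have hsw : PySem.Chars.startswith (c :: t) m = false := by
          rw [Bool.eq_false_iff]
          intro hc
          exact hp (hd ▸ (PySem.Chars.startswith_iff _ _).mp hc)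
        have hstep := pv_findFrom_step s m k hklt hp
        have hih := ih s (m :: ms) (k + 1) (by omega) (by omega) hms
        rw [hd]
        simp only [pvALoop, pvBLoop, hstart, hsw, Bool.false_eq_true, if_false, hstep]
        simp only [pvALoop, hstart1] at hih
        rw [hih, ht]

-- ===== VERDICT (by name: the statement is the Claim_ definition above) =====
theorem has_structured_tldr_spec : Claim_equal_has_structured_tldr := by
  intro text _
  unfold Spec_has_structured_tldr has_structured_tldr has_structured_tldr_alt
  have h := pv_key (text.toList.length) text.toList pvMarkers 0 (by omega) (by omega)
    (by intro m hm; fin_cases hm <;> decide)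
  simpa using h
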